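-- pv_equiv track=rewrite | github.com/AlexanderLu98/DetectingLiteraryToolsInRapLyric | rhyme_detector.py | get_rhyme_part
-- ===== SOURCE A (Python) =====
-- def get_rhyme_part(word, vowels):
--     # Split the word into syllables
--     syllables = word.split('-')
--
--     # If the word is monosyllabic, return the word
--     if len(syllables) == 1:
--         return word
--
--     for i in reversed(range(len(syllables))):
--         # Find the stressed syllable
--         if any(vowel in syllables[i] for vowel in vowels):
--             # Return the rime (the part from the vowel onwards) and all following syllables
--             return '-'.join(syllables[i:])
--
--     return ""
-- ===== SOURCE B (Python) =====
-- def get_rhyme_part(word, vowels):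
--     # Positional algorithm on the raw string: no syllable list is built.
--     # A vowel string without '-' occurs in some syllable iff it occurs in the
--     # word (an occurrence cannot cross a '-'), and the syllable of its
--     # rightmost occurrence is the last vowel-bearing syllable; snapping back
--     # to the preceding '-' gives the rhyme part as a suffix of the word.
--     if '-' not in word:
--         return word
--     q = -1
--     for v in vowels:
--         if '-' not in v:
--             q = max(q, word.rfind(v))
--     if q == -1:
--         return ""
--     return word[word.rfind('-', 0, q) + 1:]
-- ===== Notes on version B (the rewrite author's own statement) =====
-- stated objective: alternative
-- what changed: B never builds the syllable list: it takes the rightmost occurrence of any '-'-free vowel in the whole word via str.rfind, snaps back to the preceding '-' with a bounded rfind, and returns the word's suffix from there, instead of A's split-into-syllables plus reversed index scan plus join.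
import Mathlib
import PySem

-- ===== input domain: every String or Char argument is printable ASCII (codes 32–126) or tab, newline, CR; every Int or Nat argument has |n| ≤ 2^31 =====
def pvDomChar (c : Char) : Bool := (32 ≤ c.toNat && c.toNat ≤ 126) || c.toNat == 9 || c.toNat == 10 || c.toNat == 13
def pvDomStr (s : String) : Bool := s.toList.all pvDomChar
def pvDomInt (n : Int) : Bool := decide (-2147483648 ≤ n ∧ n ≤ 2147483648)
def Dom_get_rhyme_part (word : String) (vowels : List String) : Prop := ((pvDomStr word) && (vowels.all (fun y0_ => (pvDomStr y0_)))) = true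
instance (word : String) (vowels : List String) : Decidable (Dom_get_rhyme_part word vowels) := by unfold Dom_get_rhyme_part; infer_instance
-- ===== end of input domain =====

-- B replaces A's split-into-syllables + reversed index scan + join by a positional
-- algorithm on the raw string: the rightmost occurrence of any '-'-free vowel is
-- found with rfind, then the answer is the suffix of the word after the preceding
-- '-' (alternative algorithm, no syllable list is ever built).

-- ===== PORT A =====
-- 'for i in reversed(range(len(syllables)))' with early return, as structural recursion
-- over the reversed index list; syllables[i] is in range for every visited i.
def pvALoop (syllables vowels : List String) : List Int → String
  | [] => ""
  | i :: rest =>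
    if vowels.any (fun vowel => PySem.Str.isIn vowel (PySem.List.pyGetD syllables i "")) then
      PySem.Str.join "-" (PySem.List.slice syllables (some i) none)
    else pvALoop syllables vowels rest

def get_rhyme_part (word : String) (vowels : List String) : String :=
  let syllables := (PySem.Str.split? word "-").getD []
  if syllables.length = 1 then word
  else pvALoop syllables vowels (PySem.List.pyRange 0 syllables.length 1).reverse

-- ===== PORT B =====
-- 'for v in vowels: if '-' not in v: q = max(q, word.rfind(v))' as a fold over vowels
def pvVQ (vowels : List String) (word : String) : Int :=
  vowels.foldl (fun q v => if PySem.Str.isIn "-" v then q else max q (PySem.Str.rfind word v)) (-1)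

def get_rhyme_part_alt (word : String) (vowels : List String) : String :=
  if PySem.Str.isIn "-" word = false then word
  else
    let q := pvVQ vowels word
    if q = -1 then ""
    else PySem.Str.slice word (some (PySem.Str.rfindFrom word "-" 0 (some q) + 1)) none

-- ===== PRECONDITION & SPEC =====
def Spec_get_rhyme_part (word : String) (vowels : List String) (out : String) : Prop := out = get_rhyme_part_alt word vowels
instance (word : String) (vowels : List String) (out : String) : Decidable (Spec_get_rhyme_part word vowels out) := by unfold Spec_get_rhyme_part; infer_instance

-- ===== CLAIM (what is proved, stated in full; the proofs are below) =====
def Claim_equal_get_rhyme_part : Prop := ∀ (word : String) (vowels : List String), Dom_get_rhyme_part word vowels → Spec_get_rhyme_part word vowels (get_rhyme_part word vowels)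

-- ===== LEMMAS AND PROOFS =====

-- ---- rfind characterisation (PySem gives no spec lemmas for rfind; these are proved from its go loop) ----

theorem pv_go_eq_of (s sub : List Char) (k i : Nat) (hik : i ≤ k)
    (h1 : sub <+: s.drop i)
    (h2 : ∀ j, i < j → j ≤ k → ¬ sub <+: s.drop j) :
    PySem.Chars.rfind.go s sub k = (i : Int) := by
  induction k with
  | zero =>
    interval_cases i
    simp only [List.drop_zero] at h1
    simp [PySem.Chars.rfind.go, List.isPrefixOf_iff_prefix, h1]
  | succ k ih =>
    rw [PySem.Chars.rfind.go]
    by_cases hi : i = k + 1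
    · subst hi; simp [List.isPrefixOf_iff_prefix, h1]
    · have hik' : i ≤ k := by omega
      rw [if_neg (by simp [List.isPrefixOf_iff_prefix]; exact h2 (k+1) (by omega) le_rfl)]
      exact ih hik' (fun j h h' => h2 j h (by omega))

theorem pv_go_eq_neg_of (s sub : List Char) (k : Nat)
    (h : ∀ j, j ≤ k → ¬ sub <+: s.drop j) :
    PySem.Chars.rfind.go s sub k = -1 := by
  induction k with
  | zero =>
    rw [PySem.Chars.rfind.go, if_neg (by simp [List.isPrefixOf_iff_prefix]; simpa using h 0 le_rfl)]
  | succ k ih =>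
    rw [PySem.Chars.rfind.go, if_neg (by simp [List.isPrefixOf_iff_prefix]; exact h (k+1) le_rfl)]
    exact ih (fun j h' => h j (by omega))

theorem pv_go_spec (s sub : List Char) (k : Nat) :
    (PySem.Chars.rfind.go s sub k = -1 ∧ ∀ j, j ≤ k → ¬ sub <+: s.drop j) ∨
    ∃ i : Nat, PySem.Chars.rfind.go s sub k = (i : Int) ∧ i ≤ k ∧
      sub <+: s.drop i ∧ ∀ j, i < j → j ≤ k → ¬ sub <+: s.drop j := by
  induction k with
  | zero =>
    by_cases h : sub <+: s
    · right
      exact ⟨0, by rw [PySem.Chars.rfind.go, if_pos (List.isPrefixOf_iff_prefix.mpr h)]; rfl, le_rfl,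
        by simpa, fun j h1 h2 => by omega⟩
    · left
      refine ⟨by rw [PySem.Chars.rfind.go, if_neg (by simp [List.isPrefixOf_iff_prefix]; exact h)], ?_⟩
      intro j hj
      interval_cases j
      simpa using h
  | succ k ih =>
    rw [PySem.Chars.rfind.go]
    by_cases h : sub <+: s.drop (k+1)
    · right
      exact ⟨k+1, by rw [if_pos (List.isPrefixOf_iff_prefix.mpr h)], le_rfl, h,
        fun j h1 h2 => by omega⟩
    · rw [if_neg (by simp [List.isPrefixOf_iff_prefix]; exact h)]
      rcases ih with ⟨h', hno⟩ | ⟨i, hi, hik, hp, hmax⟩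
      · left
        refine ⟨h', fun j hj => ?_⟩
        by_cases hjk : j ≤ k
        · exact hno j hjk
        · have : j = k + 1 := by omega
          subst this; exact h
      · right
        refine ⟨i, hi, by omega, hp, fun j h1 h2 => ?_⟩
        by_cases hjk : j ≤ k
        · exact hmax j h1 hjk
        · have : j = k + 1 := by omega
          subst this; exact h

theorem pv_rfind_eq_of (s sub : List Char) (i : Nat) (hi : i ≤ s.length)
    (h1 : sub <+: s.drop i)
    (h2 : ∀ j, i < j → j ≤ s.length → ¬ sub <+: s.drop j) :
    PySem.Chars.rfind s sub = (i : Int) :=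
  pv_go_eq_of s sub s.length i hi h1 h2

theorem pv_rfind_eq_neg_of (s sub : List Char)
    (h : ∀ j, j ≤ s.length → ¬ sub <+: s.drop j) :
    PySem.Chars.rfind s sub = -1 :=
  pv_go_eq_neg_of s sub s.length h

theorem pv_rfind_spec (s sub : List Char) :
    (PySem.Chars.rfind s sub = -1 ∧ ∀ j, j ≤ s.length → ¬ sub <+: s.drop j) ∨
    ∃ i : Nat, PySem.Chars.rfind s sub = (i : Int) ∧ i ≤ s.length ∧ sub <+: s.drop i ∧
      ∀ j, i < j → j ≤ s.length → ¬ sub <+: s.drop j :=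
  pv_go_spec s sub s.length

theorem pv_rfind_le (s sub : List Char) : PySem.Chars.rfind s sub ≤ (s.length : Int) := by
  rcases pv_rfind_spec s sub with ⟨h, _⟩ | ⟨i, hi, hik, _, _⟩
  · rw [h]; omega
  · rw [hi]; exact_mod_cast hik

theorem pv_neg_one_le_rfind (s sub : List Char) : -1 ≤ PySem.Chars.rfind s sub := by
  rcases pv_rfind_spec s sub with ⟨h, _⟩ | ⟨i, hi, _, _, _⟩
  · rw [h]
  · rw [hi]; omega

-- a '-'-free pattern that is a prefix of a ++ '-' :: b is a prefix of a
theorem pv_prefix_split (v a b : List Char) (hv : '-' ∉ v)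
    (h : v <+: a ++ '-' :: b) : v <+: a := by
  by_cases hl : v.length ≤ a.length
  · rw [List.prefix_iff_eq_take] at h ⊢
    rw [h, List.take_append_of_le_length hl]
    simp [List.length_take, Nat.min_eq_left hl]
  · exfalso
    apply hv
    rw [List.prefix_iff_eq_take] at h
    rw [h]
    have : a.length < v.length := by omega
    have hmem : '-' ∈ (a ++ '-' :: b).take v.length := by
      rw [List.mem_take_iff_getElem]
      exact ⟨a.length, by simp; omega, by simp⟩
    exact hmem

-- occurrence of a '-'-free pattern somewhere ↔ rfind finds it
theorem pv_rfind_nonneg_of_isIn (s sub : List Char) (h : PySem.Chars.isIn sub s = true) :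
    0 ≤ PySem.Chars.rfind s sub := by
  rcases pv_rfind_spec s sub with ⟨h', hno⟩ | ⟨i, hi, _, _, _⟩
  · exfalso
    obtain ⟨j, hj⟩ := (PySem.Chars.exists_prefix_drop_iff_isIn sub s).mpr h
    by_cases hjl : j ≤ s.length
    · exact hno j hjl hj
    · have hd : s.drop j = [] := List.drop_eq_nil_of_le (by omega)
      rw [hd] at hj
      have : sub = [] := List.prefix_nil.mp hj
      subst this
      exact hno s.length le_rfl (by simp)
  · rw [hi]; exact Int.natCast_nonneg i

-- decomposition at the last '-'
theorem pv_last_dash (cs : List Char) (h : '-' ∈ cs) :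
    ∃ p t, cs = p ++ '-' :: t ∧ '-' ∉ t := by
  induction cs using List.reverseRecOn with
  | nil => simp at h
  | append_singleton cs c ih =>
    by_cases hc : c = '-'
    · exact ⟨cs, [], by simp [hc], by simp⟩
    · have h' : '-' ∈ cs := by
        rcases List.mem_append.mp h with h' | h'
        · exact h'
        · simp at h'; exact absurd h'.symm hc
      obtain ⟨p, t, rfl, ht⟩ := ih h'
      exact ⟨p, t ++ [c], by simp, by simp [ht, Ne.symm hc]⟩

-- ---- structural characterisation of split('-') ----

def pvSplit : List Char → List (List Char)
  | [] => [[]]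
  | c :: cs => if c = '-' then [] :: pvSplit cs
               else (c :: (pvSplit cs).headI) :: (pvSplit cs).tail

theorem pvSplit_ne_nil (cs : List Char) : pvSplit cs ≠ [] := by
  cases cs with
  | nil => simp [pvSplit]
  | cons c cs => by_cases h : c = '-' <;> simp [pvSplit, h]

theorem pv_splitOn_go (fuel : Nat) (l cur : List Char) (acc : List (List Char))
    (hf : l.length ≤ fuel) :
    PySem.Chars.splitOn.go ['-'] fuel l cur acc =
      acc.reverse ++ ((cur.reverse ++ (pvSplit l).headI) :: (pvSplit l).tail) := by
  induction fuel generalizing l cur acc with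
  | zero =>
    have : l = [] := List.length_eq_zero_iff.mp (by omega)
    subst this
    simp [PySem.Chars.splitOn.go, pvSplit]
  | succ fuel ih =>
    cases l with
    | nil => simp [PySem.Chars.splitOn.go, pvSplit]
    | cons c rest =>
      by_cases hc : c = '-'
      · subst hc
        rw [PySem.Chars.splitOn.go]
        rw [if_pos (by simp [List.isPrefixOf])]
        simp only [List.length_singleton, List.drop_one, List.tail_cons]
        rw [ih rest [] (List.reverse cur :: acc) (by simpa using Nat.le_of_succ_le_succ hf)]
        have hne := pvSplit_ne_nil rest
        cases hp : pvSplit rest with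
        | nil => exact absurd hp hne
        | cons h0 t0 => simp [pvSplit, hp]
      · rw [PySem.Chars.splitOn.go]
        rw [if_neg (by simp [List.isPrefixOf]; intro h; exact hc h.symm)]
        rw [ih rest (c :: cur) acc (by simpa using Nat.le_of_succ_le_succ hf)]
        have hne := pvSplit_ne_nil rest
        cases hp : pvSplit rest with
        | nil => exact absurd hp hne
        | cons h0 t0 => simp [pvSplit, hc, hp]

theorem pv_splitOn_eq (cs : List Char) : PySem.Chars.splitOn cs ['-'] = pvSplit cs := by
  rw [PySem.Chars.splitOn, pv_splitOn_go (cs.length + 1) cs [] [] (by omega)]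
  have hne := pvSplit_ne_nil cs
  cases hp : pvSplit cs with
  | nil => exact absurd hp hne
  | cons h0 t0 => simp

theorem pvSplit_no_dash (t : List Char) (h : '-' ∉ t) : pvSplit t = [t] := by
  induction t with
  | nil => simp [pvSplit]
  | cons c cs ih =>
    simp only [List.mem_cons, not_or] at h
    simp [pvSplit, (Ne.symm h.1 : ¬ c = '-'), ih h.2]

theorem pvSplit_append (p t : List Char) (h : '-' ∉ t) :
    pvSplit (p ++ '-' :: t) = pvSplit p ++ [t] := by
  induction p with
  | nil => simp [pvSplit, pvSplit_no_dash t h]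
  | cons c p ih =>
    by_cases hc : c = '-'
    · simp [pvSplit, hc, ih]
    · have hne := pvSplit_ne_nil p
      cases hp : pvSplit p with
      | nil => exact absurd hp hne
      | cons s rest => simp [pvSplit, hc, ih, hp]

theorem pvSplit_dash_free (cs : List Char) : ∀ s ∈ pvSplit cs, '-' ∉ s := by
  induction cs with
  | nil => simp [pvSplit]
  | cons c cs ih =>
    intro s hs
    by_cases hc : c = '-'
    · rw [pvSplit, if_pos hc] at hs
      rcases List.mem_cons.mp hs with hs | hs
      · subst hs; simp
      · exact ih s hs
    · have hne := pvSplit_ne_nil cs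
      cases hp : pvSplit cs with
      | nil => exact absurd hp hne
      | cons h0 rest =>
        rw [pvSplit, if_neg hc, hp] at hs
        rcases List.mem_cons.mp hs with hs | hs
        · subst hs
          intro hmem
          rcases List.mem_cons.mp hmem with h' | h'
          · exact hc h'.symm
          · exact ih h0 (by rw [hp]; exact List.mem_cons_self ..) h'
        · exact ih s (by rw [hp]; exact List.mem_cons_of_mem _ hs)

theorem pvSplit_len_one (cs : List Char) : (pvSplit cs).length = 1 ↔ '-' ∉ cs := by
  constructor
  · intro h hm
    obtain ⟨p, t, rfl, ht⟩ := pv_last_dash cs hm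
    rw [pvSplit_append p t ht, List.length_append] at h
    have h1 : 1 ≤ (pvSplit p).length := List.length_pos_of_ne_nil (pvSplit_ne_nil p)
    simp only [List.length_cons, List.length_nil] at h
    omega
  · intro h; rw [pvSplit_no_dash cs h]; rfl


-- ---- rfind over a decomposition p ++ '-' :: t with '-'-free t ----

theorem pv_drop_high (p t : List Char) (c : Char) (k : Nat) :
    (p ++ c :: t).drop (p.length + 1 + k) = t.drop k := by
  rw [List.drop_append]
  rw [List.drop_eq_nil_of_le (by omega), List.nil_append]
  have : p.length + 1 + k - p.length = k + 1 := by omega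
  rw [this]
  rfl

theorem pv_rfind_dash (p t : List Char) (ht : '-' ∉ t) :
    PySem.Chars.rfind (p ++ '-' :: t) ['-'] = (p.length : Int) := by
  apply pv_rfind_eq_of
  · simp
  · rw [List.drop_left]
    exact ⟨t, rfl⟩
  · intro j hj hjl hp
    simp only [List.length_append, List.length_cons] at hjl
    obtain ⟨k, rfl⟩ : ∃ k, j = p.length + 1 + k := ⟨j - p.length - 1, by omega⟩
    rw [pv_drop_high] at hp
    exact ht (List.drop_subset _ _ (hp.mem (List.mem_singleton_self '-')))

theorem pv_rfind_dash_free (s : List Char) (h : '-' ∉ s) :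
    PySem.Chars.rfind s ['-'] = -1 := by
  apply pv_rfind_eq_neg_of
  intro j _ hp
  exact h (List.drop_subset _ _ (hp.mem (List.mem_singleton_self '-')))

theorem pv_rfind_app_in (p t v : List Char) (_hv : '-' ∉ v)
    (hin : PySem.Chars.isIn v t = true) :
    PySem.Chars.rfind (p ++ '-' :: t) v = (p.length : Int) + 1 + PySem.Chars.rfind t v := by
  rcases pv_rfind_spec t v with ⟨hneg, _⟩ | ⟨i, hi, hil, hpre, hmax⟩
  · have := pv_rfind_nonneg_of_isIn t v hin
    omega
  · rw [hi]
    have : ((p.length : Int) + 1 + i) = ((p.length + 1 + i : Nat) : Int) := by push_cast; ring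
    rw [this]
    apply pv_rfind_eq_of
    · simp; omega
    · rw [pv_drop_high]; exact hpre
    · intro j hj hjl hp
      simp only [List.length_append, List.length_cons] at hjl
      obtain ⟨k, rfl⟩ : ∃ k, j = p.length + 1 + k := ⟨j - p.length - 1, by omega⟩
      rw [pv_drop_high] at hp
      exact hmax k (by omega) (by omega) hp

theorem pv_rfind_app_out (p t v : List Char) (hv : '-' ∉ v)
    (hin : PySem.Chars.isIn v t = false) :
    PySem.Chars.rfind (p ++ '-' :: t) v = PySem.Chars.rfind p v := by
  have hnot : ∀ k, ¬ v <+: t.drop k := by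
    intro k hp
    have : PySem.Chars.isIn v t = true :=
      (PySem.Chars.exists_prefix_drop_iff_isIn v t).mp ⟨k, hp⟩
    rw [hin] at this; exact absurd this (by simp)
  rcases pv_rfind_spec p v with ⟨hneg, hno⟩ | ⟨i, hi, hil, hpre, hmax⟩
  · rw [hneg]
    apply pv_rfind_eq_neg_of
    intro j hjl hp
    by_cases hjp : j ≤ p.length
    · rw [List.drop_append_of_le_length hjp] at hp
      exact hno j hjp (pv_prefix_split v _ t hv hp)
    · simp only [List.length_append, List.length_cons] at hjl
      obtain ⟨k, rfl⟩ : ∃ k, j = p.length + 1 + k := ⟨j - p.length - 1, by omega⟩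
      rw [pv_drop_high] at hp
      exact hnot k hp
  · rw [hi]
    apply pv_rfind_eq_of
    · simp; omega
    · rw [List.drop_append_of_le_length hil]
      exact hpre.trans (List.prefix_append _ _)
    · intro j hj hjl hp
      by_cases hjp : j ≤ p.length
      · rw [List.drop_append_of_le_length hjp] at hp
        exact hmax j hj hjp (pv_prefix_split v _ t hv hp)
      · simp only [List.length_append, List.length_cons] at hjl
        obtain ⟨k, rfl⟩ : ∃ k, j = p.length + 1 + k := ⟨j - p.length - 1, by omega⟩
        rw [pv_drop_high] at hp
        exact hnot k hp

-- ---- the fold computing q in port B ----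

theorem pv_foldq_init (vowels : List String) (word : String) (init : Int) :
    init ≤ vowels.foldl
      (fun q v => if PySem.Str.isIn "-" v then q else max q (PySem.Str.rfind word v)) init := by
  induction vowels generalizing init with
  | nil => simp
  | cons v vs ih =>
    simp only [List.foldl_cons]
    by_cases h : PySem.Str.isIn "-" v
    · simp only [h, if_true]; exact ih init
    · rw [if_neg h]
      exact le_trans (le_max_left _ _) (ih _)

theorem pv_foldq_spec (vowels : List String) (word : String) (init : Int) :
    (∀ v ∈ vowels, PySem.Str.isIn "-" v = false →
        PySem.Str.rfind word v ≤ vowels.foldl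
          (fun q v => if PySem.Str.isIn "-" v then q else max q (PySem.Str.rfind word v)) init) ∧
    ((vowels.foldl
        (fun q v => if PySem.Str.isIn "-" v then q else max q (PySem.Str.rfind word v)) init) = init ∨
      ∃ v ∈ vowels, PySem.Str.isIn "-" v = false ∧
        (vowels.foldl
          (fun q v => if PySem.Str.isIn "-" v then q else max q (PySem.Str.rfind word v)) init)
          = PySem.Str.rfind word v) := by
  induction vowels generalizing init with
  | nil => simp
  | cons v vs ih =>
    simp only [List.foldl_cons]
    by_cases h : PySem.Str.isIn "-" v = true
    · simp only [h, if_true]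
      refine ⟨?_, ?_⟩
      · intro u hu hcu
        rcases List.mem_cons.mp hu with rfl | hu
        · rw [hcu] at h; exact absurd h (by simp)
        · exact (ih init).1 u hu hcu
      · rcases (ih init).2 with h' | ⟨u, hu, hcu, he⟩
        · exact Or.inl h'
        · exact Or.inr ⟨u, List.mem_cons_of_mem _ hu, hcu, he⟩
    · have hb : PySem.Str.isIn "-" v = false := by simpa using h
      simp only [hb, Bool.false_eq_true, if_false]
      refine ⟨?_, ?_⟩
      · intro u hu hcu
        rcases List.mem_cons.mp hu with rfl | hu
        · exact le_trans (le_max_right _ _) (pv_foldq_init vs word _)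
        · exact (ih _).1 u hu hcu
      · rcases (ih (max init (PySem.Str.rfind word v))).2 with h' | ⟨u, hu, hcu, he⟩
        · rcases max_cases init (PySem.Str.rfind word v) with ⟨hm, _⟩ | ⟨hm, _⟩
          · exact Or.inl (h'.trans hm)
          · exact Or.inr ⟨v, List.mem_cons_self .., hb, h'.trans hm⟩
        · exact Or.inr ⟨u, List.mem_cons_of_mem _ hu, hcu, he⟩

theorem pv_foldq_congr (w1 w2 : String) : ∀ (vowels : List String) (init : Int),
    (∀ v ∈ vowels, PySem.Str.isIn "-" v = false →
      PySem.Str.rfind w1 v = PySem.Str.rfind w2 v) →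
    vowels.foldl (fun q v => if PySem.Str.isIn "-" v then q else max q (PySem.Str.rfind w1 v)) init =
    vowels.foldl (fun q v => if PySem.Str.isIn "-" v then q else max q (PySem.Str.rfind w2 v)) init
  | [], init, _ => rfl
  | v :: vs, init, h => by
    simp only [List.foldl_cons]
    by_cases hc : PySem.Str.isIn "-" v = true
    · simp only [hc, if_true]
      exact pv_foldq_congr w1 w2 vs init (fun u hu hcu => h u (List.mem_cons_of_mem _ hu) hcu)
    · have hb : PySem.Str.isIn "-" v = false := by simpa using hc
      simp only [hb, Bool.false_eq_true, if_false]
      rw [h v (List.mem_cons_self ..) hb]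
      exact pv_foldq_congr w1 w2 vs _ (fun u hu hcu => h u (List.mem_cons_of_mem _ hu) hcu)


-- ---- the A-side scan as a find? over the reversed index range ----

def pvSpecF (vowels syls : List String) : String :=
  match (PySem.List.pyRange 0 syls.length 1).reverse.find?
      (fun i => vowels.any (fun vowel => PySem.Str.isIn vowel (PySem.List.pyGetD syls i ""))) with
  | some i => PySem.Str.join "-" (PySem.List.slice syls (some i) none)
  | none => ""

theorem pv_aLoop_eq (syllables vowels : List String) (l : List Int) :
    pvALoop syllables vowels l
      = match l.find? (fun i => vowels.any
            (fun vowel => PySem.Str.isIn vowel (PySem.List.pyGetD syllables i ""))) with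
        | some i => PySem.Str.join "-" (PySem.List.slice syllables (some i) none)
        | none => "" := by
  induction l with
  | nil => simp [pvALoop]
  | cons i rest ih =>
    simp only [pvALoop, List.find?_cons]
    by_cases h : (vowels.any
        (fun vowel => PySem.Str.isIn vowel (PySem.List.pyGetD syllables i ""))) = true
    · rw [if_pos h, h]
    · rw [if_neg h]
      rw [Bool.not_eq_true] at h
      rw [h]
      exact ih

theorem pv_find?_congr {α : Type} (p q : α → Bool) (l : List α)
    (h : ∀ x ∈ l, p x = q x) : l.find? p = l.find? q := by
  induction l with
  | nil => rfl
  | cons x xs ih =>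
    rw [List.find?_cons, List.find?_cons, h x (List.mem_cons_self ..)]
    cases q x
    · exact ih (fun y hy => h y (List.mem_cons_of_mem _ hy))
    · rfl

theorem pv_chars_join_concat : ∀ (l : List (List Char)) (tl : List Char), l ≠ [] →
    PySem.Chars.join ['-'] (l ++ [tl]) = PySem.Chars.join ['-'] l ++ '-' :: tl
  | [x], tl, _ => by
    rw [List.singleton_append, PySem.Chars.join_cons_cons, PySem.Chars.join_singleton,
      PySem.Chars.join_singleton, List.append_assoc]
    rfl
  | x :: y :: rest, tl, _ => by
    rw [List.cons_append, List.cons_append, PySem.Chars.join_cons_cons, ← List.cons_append,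
      pv_chars_join_concat (y :: rest) tl (by simp), PySem.Chars.join_cons_cons]
    simp [List.append_assoc]

theorem pv_join_concat (xs : List String) (t : String) (h : xs ≠ []) :
    PySem.Str.join "-" (xs ++ [t]) = PySem.Str.join "-" xs ++ "-" ++ t := by
  rw [← String.toList_inj]
  rw [PySem.Str.toList_join, String.toList_append, String.toList_append, PySem.Str.toList_join]
  rw [List.map_append, List.map_singleton]
  have hd : ("-" : String).toList = ['-'] := rfl
  rw [hd, pv_chars_join_concat _ _ (by simpa using h)]
  simp [List.append_assoc]

theorem pv_join_single (s : String) : PySem.Str.join "-" [s] = s := by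
  rw [← String.toList_inj, PySem.Str.toList_join, List.map_singleton, PySem.Chars.join_singleton]

theorem pvSpecF_single (vowels : List String) (s : String) :
    pvSpecF vowels [s] = if vowels.any (fun vowel => PySem.Str.isIn vowel s) then s else "" := by
  unfold pvSpecF
  have hr : PySem.List.pyRange 0 (([s] : List String).length : Int) 1 = [0] := by
    simp only [List.length_singleton, Nat.cast_one]
    decide
  rw [hr]
  simp only [List.reverse_singleton, List.find?_singleton, PySem.List.pyGetD_zero_cons]
  by_cases h : vowels.any (fun vowel => PySem.Str.isIn vowel s) = true
  · rw [if_pos h, h]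
    simp only []
    rw [PySem.List.slice_from _ (le_refl 0)]
    simp only [Int.toNat_zero, List.drop_zero]
    rw [pv_join_single]
    exact (if_pos trivial).symm
  · rw [Bool.not_eq_true] at h
    rw [h]
    simp only [Bool.false_eq_true, if_false]

theorem pv_range_concat (syls : List String) (t : String) :
    (PySem.List.pyRange 0 (((syls ++ [t]).length : Nat) : Int) 1).reverse
      = ((syls.length : Nat) : Int) :: (PySem.List.pyRange 0 ((syls.length : Nat) : Int) 1).reverse := by
  rw [List.length_append, List.length_singleton]
  push_cast
  rw [PySem.List.pyRange_one_succ_right (by positivity)]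
  rw [List.reverse_append, List.reverse_singleton, List.singleton_append]

theorem pv_getD_concat_last (syls : List String) (t : String) :
    PySem.List.pyGetD (syls ++ [t]) ((syls.length : Nat) : Int) "" = t := by
  rw [PySem.List.pyGetD_natCast]
  rw [List.getD_eq_getElem?_getD, List.getElem?_append_right (le_refl syls.length)]
  simp

theorem pv_getD_concat_lt (syls : List String) (t : String) (i : Int)
    (h0 : 0 ≤ i) (hl : i < (syls.length : Int)) :
    PySem.List.pyGetD (syls ++ [t]) i "" = PySem.List.pyGetD syls i "" := by
  rw [PySem.List.pyGetD_of_nonneg _ _ h0, PySem.List.pyGetD_of_nonneg _ _ h0]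
  rw [List.getD_eq_getElem?_getD, List.getD_eq_getElem?_getD]
  rw [List.getElem?_append_left (by omega)]

theorem pvSpecF_concat_true (vowels syls : List String) (t : String)
    (ht : vowels.any (fun vowel => PySem.Str.isIn vowel t) = true) :
    pvSpecF vowels (syls ++ [t]) = t := by
  unfold pvSpecF
  rw [pv_range_concat, List.find?_cons, pv_getD_concat_last, ht]
  simp only []
  rw [PySem.List.slice_from _ (by positivity)]
  rw [Int.toNat_natCast, List.drop_left, pv_join_single]

theorem pvSpecF_concat_false (vowels syls : List String) (t : String)
    (ht : vowels.any (fun vowel => PySem.Str.isIn vowel t) = false) :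
    pvSpecF vowels (syls ++ [t]) =
      match (PySem.List.pyRange 0 syls.length 1).reverse.find?
          (fun i => vowels.any (fun vowel => PySem.Str.isIn vowel (PySem.List.pyGetD syls i ""))) with
      | some i => PySem.Str.join "-" (PySem.List.slice syls (some i) none) ++ "-" ++ t
      | none => "" := by
  unfold pvSpecF
  rw [pv_range_concat, List.find?_cons, pv_getD_concat_last, ht]
  simp only []
  rw [pv_find?_congr _ (fun i => vowels.any
      (fun vowel => PySem.Str.isIn vowel (PySem.List.pyGetD syls i ""))) _
    (by
      intro i hi
      rw [List.mem_reverse, PySem.List.mem_pyRange_one] at hi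
      rw [pv_getD_concat_lt syls t i hi.1 hi.2])]
  cases hf : (PySem.List.pyRange 0 ((syls.length : Nat) : Int) 1).reverse.find?
      (fun i => vowels.any (fun vowel => PySem.Str.isIn vowel (PySem.List.pyGetD syls i ""))) with
  | none => rfl
  | some i =>
    simp only []
    have hi : 0 ≤ i ∧ i < (syls.length : Int) := by
      have := List.mem_of_find?_eq_some hf
      rw [List.mem_reverse, PySem.List.mem_pyRange_one] at this
      exact this
    rw [PySem.List.slice_from _ hi.1, PySem.List.slice_from _ hi.1]
    rw [List.drop_append_of_le_length (by omega)]
    rw [pv_join_concat _ _ (by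
      intro hc
      have := congrArg List.length hc
      rw [List.length_drop] at this
      simp at this
      omega)]

-- the head piece of pvSplit is a prefix of the string
theorem pvSplit_infix_head : ∀ (cs : List Char), (pvSplit cs).headI <+: cs
  | [] => by simp [pvSplit]
  | c :: cs => by
    by_cases hc : c = '-'
    · rw [pvSplit, if_pos hc]
      exact List.nil_prefix
    · have hne := pvSplit_ne_nil cs
      cases hp : pvSplit cs with
      | nil => exact absurd hp hne
      | cons h0 rest =>
        rw [pvSplit, if_neg hc]
        simp only [List.headI_cons]
        have := pvSplit_infix_head cs
        rw [hp] at this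
        simp only [List.headI_cons] at this
        exact List.cons_prefix_cons.mpr ⟨rfl, by rw [hp]; simpa using this⟩

-- pieces of pvSplit sit inside the original string
theorem pvSplit_infix (cs : List Char) : ∀ s ∈ pvSplit cs, s <:+: cs := by
  induction cs with
  | nil =>
    intro s hs
    simp only [pvSplit, List.mem_singleton] at hs
    subst hs; exact List.infix_rfl
  | cons c cs ih =>
    intro s hs
    by_cases hc : c = '-'
    · rw [pvSplit, if_pos hc] at hs
      rcases List.mem_cons.mp hs with rfl | hs
      · exact List.nil_infix
      · exact (ih s hs).trans (List.infix_cons List.infix_rfl)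
    · have hne := pvSplit_ne_nil cs
      cases hp : pvSplit cs with
      | nil => exact absurd hp hne
      | cons h0 rest =>
        rw [pvSplit, if_neg hc, hp] at hs
        rcases List.mem_cons.mp hs with rfl | hs
        · have hpre : h0 <+: cs := by
            have := pvSplit_infix_head cs
            rw [hp] at this
            simpa using this
          exact (List.cons_prefix_cons.mpr ⟨rfl, hpre⟩).isInfix
        · exact ((ih s (by rw [hp]; exact List.mem_cons_of_mem _ hs))).trans (List.infix_cons List.infix_rfl)

-- bounded rfind of '-' used by port B, rewritten as an rfind on a prefix
theorem pv_rfindFrom_take (s : List Char) (q : Int) (h0 : 0 ≤ q) (hl : q ≤ (s.length : Int)) :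
    PySem.Chars.rfindFrom s ['-'] 0 (some q) =
      (if PySem.Chars.rfind (s.take q.toNat) ['-'] = -1 then -1
       else PySem.Chars.rfind (s.take q.toNat) ['-']) := by
  unfold PySem.Chars.rfindFrom
  simp only []
  rw [if_neg (not_lt.mpr hl)]
  rw [if_neg (by omega : ¬ ((0:Int) < 0))]
  rw [if_neg (by omega : ¬ q < 0)]
  simp only [List.drop_zero, Int.toNat_zero]
  by_cases h : PySem.Chars.rfind (s.take q.toNat) ['-'] = -1
  · rw [if_pos h, if_pos h, if_neg (by omega : ¬ q < 0)]
  · rw [if_neg h, if_neg h, zero_add, if_neg (by omega : ¬ q < 0)]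

-- the syllable list of port A is pvSplit of the word
theorem pv_syllables (word : String) :
    (PySem.Str.split? word "-").getD [] = (pvSplit word.toList).map String.ofList := by
  simp [PySem.Str.split?, PySem.Chars.split?, pv_splitOn_eq]


-- ---- small bridges used by the main induction ----

theorem pv_dash_cond (v : String) : PySem.Str.isIn "-" v = false ↔ '-' ∉ v.toList := by
  rw [PySem.Str.isIn_eq]
  have hd : ("-" : String).toList = ['-'] := rfl
  rw [hd, PySem.Chars.isIn_eq_false_iff, List.singleton_infix_iff]

theorem pv_slice_toList (w : String) (a : Int) (h : 0 ≤ a) :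
    (PySem.Str.slice w (some a) none).toList = w.toList.drop a.toNat := by
  rw [PySem.Str.toList_slice, PySem.Chars.slice_eq_listSlice, PySem.List.slice_from _ h]

theorem pv_isIn_of_rfind_nonneg (s sub : List Char) (h : 0 ≤ PySem.Chars.rfind s sub) :
    PySem.Chars.isIn sub s = true := by
  rcases pv_rfind_spec s sub with ⟨hneg, _⟩ | ⟨i, _, _, hpre, _⟩
  · rw [hneg] at h; omega
  · exact (PySem.Chars.exists_prefix_drop_iff_isIn sub s).mp ⟨i, hpre⟩

theorem pv_getD_map (l : List (List Char)) (i : Int) :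
    PySem.List.pyGetD (l.map String.ofList) i "" = String.ofList (PySem.List.pyGetD l i []) := by
  rw [show ("" : String) = String.ofList [] from rfl, PySem.List.pyGetD_map]

theorem pv_getD_mem (l : List (List Char)) (i : Int) (h0 : 0 ≤ i) (hl : i < (l.length : Int)) :
    PySem.List.pyGetD l i [] ∈ l := by
  rw [PySem.List.pyGetD_of_nonneg _ _ h0]
  rw [List.getD_eq_getElem?_getD, List.getElem?_eq_getElem (by omega)]
  exact List.getElem_mem _

theorem pv_pred_false_of_no_occ (vowels : List String) (p : List Char)
    (h : ∀ v ∈ vowels, '-' ∉ v.toList → PySem.Chars.isIn v.toList p = false) :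
    ∀ s ∈ pvSplit p, vowels.any (fun vowel => PySem.Str.isIn vowel (String.ofList s)) = false := by
  intro s hs
  rw [List.any_eq_false]
  intro v hv hc
  rw [PySem.Str.isIn_eq, String.toList_ofList] at hc
  have hinf : v.toList <:+: s := (PySem.Chars.isIn_iff_infix _ _).mp hc
  by_cases hd : '-' ∈ v.toList
  · exact pvSplit_dash_free p s hs (hinf.subset hd)
  · have hin : PySem.Chars.isIn v.toList p = true :=
      (PySem.Chars.isIn_iff_infix _ _).mpr (hinf.trans (pvSplit_infix p s hs))
    rw [h v hv hd] at hin
    exact absurd hin (by simp)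

-- the leaf case: no '-' in the word
theorem pv_main_leaf (vowels : List String) (word : String) (hg : '-' ∉ word.toList) :
    (if pvVQ vowels word = -1 then ""
     else PySem.Str.slice word (some (PySem.Str.rfindFrom word "-" 0 (some (pvVQ vowels word)) + 1)) none)
    = pvSpecF vowels ((pvSplit word.toList).map String.ofList) := by
  rw [pvSplit_no_dash _ hg, List.map_singleton, String.ofList_toList, pvSpecF_single]
  by_cases hq : pvVQ vowels word = -1
  · rw [if_pos hq]
    have hany : vowels.any (fun vowel => PySem.Str.isIn vowel word) = false := by
      rw [List.any_eq_false]
      intro v hv hc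
      by_cases hd : '-' ∈ v.toList
      · exact hg (((PySem.Str.isIn_iff_infix v word).mp hc).subset hd)
      · have hle : PySem.Str.rfind word v ≤ pvVQ vowels word :=
          (pv_foldq_spec vowels word (-1)).1 v hv ((pv_dash_cond v).mpr hd)
        have hge := pv_rfind_nonneg_of_isIn word.toList v.toList
          ((PySem.Chars.isIn_iff_infix _ _).mpr ((PySem.Str.isIn_iff_infix v word).mp hc))
        rw [PySem.Str.rfind_eq] at hle
        omega
    rw [hany]
    rfl
  · rw [if_neg hq]
    have hge : (-1 : Int) ≤ pvVQ vowels word := pv_foldq_init vowels word (-1)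
    have hq0 : 0 ≤ pvVQ vowels word := by omega
    rcases (pv_foldq_spec vowels word (-1)).2 with h' | ⟨u, hu, hcu, he⟩
    · exact absurd h' hq
    · have he' : pvVQ vowels word = PySem.Str.rfind word u := he
      have hql : pvVQ vowels word ≤ (word.toList.length : Int) := by
        rw [he', PySem.Str.rfind_eq]
        exact pv_rfind_le _ _
      have hany : vowels.any (fun vowel => PySem.Str.isIn vowel word) = true := by
        rw [List.any_eq_true]
        refine ⟨u, hu, ?_⟩
        rw [PySem.Str.isIn_eq]
        apply pv_isIn_of_rfind_nonneg
        rw [← PySem.Str.rfind_eq, ← he']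
        exact hq0
      rw [hany]
      simp only [if_true]
      rw [PySem.Str.rfindFrom_eq]
      have hd : ("-" : String).toList = ['-'] := rfl
      rw [hd, pv_rfindFrom_take _ _ hq0 hql]
      rw [pv_rfind_dash_free _ (fun hc => hg (List.take_subset _ _ hc))]
      rw [if_pos rfl]
      rw [← String.toList_inj, pv_slice_toList _ _ (by omega)]
      norm_num

-- the step case machinery and the induction itself
theorem pv_main : ∀ (n : Nat) (vowels : List String) (word : String), word.toList.length ≤ n →
    (if pvVQ vowels word = -1 then ""
     else PySem.Str.slice word (some (PySem.Str.rfindFrom word "-" 0 (some (pvVQ vowels word)) + 1)) none)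
    = pvSpecF vowels ((pvSplit word.toList).map String.ofList) := by
  intro n
  induction n with
  | zero =>
    intro vowels word hlen
    have : word.toList = [] := List.length_eq_zero_iff.mp (by omega)
    exact pv_main_leaf vowels word (by rw [this]; simp)
  | succ n ih =>
    intro vowels word hlen
    by_cases hg : '-' ∈ word.toList
    · obtain ⟨p, t, hcs, ht⟩ := pv_last_dash word.toList hg
      have hsplit : pvSplit word.toList = pvSplit p ++ [t] := by
        rw [hcs, pvSplit_append p t ht]
      rw [hsplit, List.map_append, List.map_singleton]
      have hPl : (String.ofList p).toList = p := String.toList_ofList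
      have hTl : (String.ofList t).toList = t := String.toList_ofList
      have hwlen : word.toList.length = p.length + 1 + t.length := by
        rw [hcs]; simp [List.length_append]; omega
      by_cases htm : ∃ v ∈ vowels, '-' ∉ v.toList ∧ PySem.Chars.isIn v.toList t = true
      · -- some '-'-free vowel occurs in the last piece: the answer is that piece
        obtain ⟨v, hv, hvd, hvin⟩ := htm
        have hrv : PySem.Str.rfind word v
            = (p.length : Int) + 1 + PySem.Chars.rfind t v.toList := by
          rw [PySem.Str.rfind_eq, hcs, pv_rfind_app_in p t _ hvd hvin]
        have htn : 0 ≤ PySem.Chars.rfind t v.toList := pv_rfind_nonneg_of_isIn t v.toList hvin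
        have hle : PySem.Str.rfind word v ≤ pvVQ vowels word :=
          (pv_foldq_spec vowels word (-1)).1 v hv ((pv_dash_cond v).mpr hvd)
        have hqp : (p.length : Int) + 1 ≤ pvVQ vowels word := by omega
        have hq : ¬ pvVQ vowels word = -1 := by omega
        have hql : pvVQ vowels word ≤ (word.toList.length : Int) := by
          rcases (pv_foldq_spec vowels word (-1)).2 with h' | ⟨u, _, _, he⟩
          · have h'' : pvVQ vowels word = -1 := h'
            omega
          · have he' : pvVQ vowels word = PySem.Str.rfind word u := he
            rw [he', PySem.Str.rfind_eq]; exact pv_rfind_le _ _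
        rw [if_neg hq]
        rw [PySem.Str.rfindFrom_eq]
        have hd : ("-" : String).toList = ['-'] := rfl
        rw [hd, pv_rfindFrom_take _ _ (by omega) hql]
        have htake : word.toList.take (pvVQ vowels word).toNat
            = p ++ '-' :: t.take ((pvVQ vowels word).toNat - p.length - 1) := by
          rw [hcs, List.take_append, List.take_of_length_le (by omega)]
          have : (pvVQ vowels word).toNat - p.length = ((pvVQ vowels word).toNat - p.length - 1) + 1 := by
            omega
          rw [this, List.take_succ_cons]
          norm_num
        have hrd : PySem.Chars.rfind (word.toList.take (pvVQ vowels word).toNat) ['-']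
            = (p.length : Int) := by
          rw [htake]
          exact pv_rfind_dash p _ (fun hc => ht (List.take_subset _ _ hc))
        rw [hrd, if_neg (by omega)]
        rw [pvSpecF_concat_true vowels _ _ (by
          rw [List.any_eq_true]
          exact ⟨v, hv, by rw [PySem.Str.isIn_eq, hTl]; exact hvin⟩)]
        rw [← String.toList_inj, pv_slice_toList _ _ (by omega), hTl, hcs]
        have : ((p.length : Int) + 1).toNat = p.length + 1 + 0 := by omega
        rw [this, pv_drop_high p t '-' 0]
        rfl
      · -- no '-'-free vowel occurs in the last piece
        have hnotin : ∀ v ∈ vowels, '-' ∉ v.toList → PySem.Chars.isIn v.toList t = false := by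
          intro v hv hd
          by_contra hc
          exact htm ⟨v, hv, hd, by simpa using hc⟩
        have hrf : ∀ v ∈ vowels, PySem.Str.isIn "-" v = false →
            PySem.Str.rfind word v = PySem.Str.rfind (String.ofList p) v := by
          intro v hv hc
          have hd := (pv_dash_cond v).mp hc
          rw [PySem.Str.rfind_eq, PySem.Str.rfind_eq, hPl, hcs,
            pv_rfind_app_out p t _ hd (hnotin v hv hd)]
        have hqq : pvVQ vowels word = pvVQ vowels (String.ofList p) :=
          pv_foldq_congr word (String.ofList p) vowels (-1) hrf
        have htF : vowels.any (fun vowel => PySem.Str.isIn vowel (String.ofList t)) = false := by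
          rw [List.any_eq_false]
          intro v hv hc
          rw [PySem.Str.isIn_eq, hTl] at hc
          by_cases hd : '-' ∈ v.toList
          · exact ht (((PySem.Chars.isIn_iff_infix _ _).mp hc).subset hd)
          · rw [hnotin v hv hd] at hc; exact absurd hc (by simp)
        rw [pvSpecF_concat_false vowels _ _ htF]
        have ihp := ih vowels (String.ofList p) (by rw [hPl]; omega)
        rw [hPl] at ihp
        by_cases hq : pvVQ vowels word = -1
        · rw [if_pos hq]
          have hno : ∀ v ∈ vowels, '-' ∉ v.toList → PySem.Chars.isIn v.toList p = false := by
            intro v hv hd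
            by_contra hc
            have hc' : PySem.Chars.isIn v.toList p = true := by simpa using hc
            have hge := pv_rfind_nonneg_of_isIn p v.toList hc'
            have hle : PySem.Str.rfind word v ≤ pvVQ vowels word :=
              (pv_foldq_spec vowels word (-1)).1 v hv ((pv_dash_cond v).mpr hd)
            rw [hrf v hv ((pv_dash_cond v).mpr hd), PySem.Str.rfind_eq, hPl] at hle
            omega
          have hfind : (PySem.List.pyRange 0 (((pvSplit p).map String.ofList).length : Int) 1).reverse.find?
              (fun i => vowels.any (fun vowel =>
                PySem.Str.isIn vowel (PySem.List.pyGetD ((pvSplit p).map String.ofList) i ""))) = none := by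
            rw [List.find?_eq_none]
            intro i hi
            rw [List.mem_reverse, PySem.List.mem_pyRange_one] at hi
            rw [pv_getD_map]
            have hm := pv_getD_mem (pvSplit p) i hi.1 (by
              rw [List.length_map] at hi
              exact_mod_cast hi.2)
            rw [pv_pred_false_of_no_occ vowels p hno _ hm]
            simp
          rw [hfind]
        · rw [if_neg hq]
          have hge : (-1 : Int) ≤ pvVQ vowels word := pv_foldq_init vowels word (-1)
          have hq0 : 0 ≤ pvVQ vowels word := by omega
          rcases (pv_foldq_spec vowels word (-1)).2 with h' | ⟨u, hu, hcu, he⟩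
          · exact absurd (h' : pvVQ vowels word = -1) hq
          · have he' : pvVQ vowels word = PySem.Str.rfind word u := he
            have hud : '-' ∉ u.toList := (pv_dash_cond u).mp hcu
            have hpu : PySem.Chars.rfind p u.toList = pvVQ vowels word := by
              rw [← hPl, ← PySem.Str.rfind_eq, ← hrf u hu hcu, ← he']
            have hun : u.toList ≠ [] := by
              intro hnil
              exact htm ⟨u, hu, by rw [hnil]; simp, by rw [hnil]; exact PySem.Chars.isIn_nil t⟩
            have hql : pvVQ vowels word < (p.length : Int) := by
              rcases pv_rfind_spec p u.toList with ⟨hneg, _⟩ | ⟨i, hi, hil, hpre, _⟩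
              · rw [hneg] at hpu; omega
              · rw [hi] at hpu
                have hdne : p.drop i ≠ [] := by
                  intro hnil
                  rw [hnil, List.prefix_nil] at hpre
                  exact hun hpre
                rw [Ne, List.drop_eq_nil_iff] at hdne
                omega
            have hwl' : (word.toList.length : Int) = (p.length : Int) + 1 + (t.length : Int) := by
              exact_mod_cast hwlen
            rw [PySem.Str.rfindFrom_eq]
            have hd : ("-" : String).toList = ['-'] := rfl
            rw [hd, pv_rfindFrom_take _ _ hq0 (by omega)]
            have htake : word.toList.take (pvVQ vowels word).toNat = p.take (pvVQ vowels word).toNat := by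
              rw [hcs, List.take_append_of_le_length (by omega)]
            rw [htake]
            -- rewrite the inner result of the IH the same way
            rw [← hqq, PySem.Str.rfindFrom_eq, hd, hPl,
              pv_rfindFrom_take _ _ hq0 (by omega), if_neg hq] at ihp
            have hrle : PySem.Chars.rfind (p.take (pvVQ vowels word).toNat) ['-']
                < pvVQ vowels word := by
              rcases pv_rfind_spec (p.take (pvVQ vowels word).toNat) ['-'] with ⟨hneg, _⟩ | ⟨i, hi, hil, hpre, _⟩
              · rw [hneg]; omega
              · rw [hi]
                have hdne : (p.take (pvVQ vowels word).toNat).drop i ≠ [] := by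
                  intro hnil
                  rw [hnil, List.prefix_nil] at hpre
                  exact absurd hpre (by simp)
                rw [Ne, List.drop_eq_nil_iff, List.length_take] at hdne
                omega
            by_cases hr : PySem.Chars.rfind (p.take (pvVQ vowels word).toNat) ['-'] = -1
            · rw [if_pos hr] at ihp ⊢
              cases hf : (PySem.List.pyRange 0 (((pvSplit p).map String.ofList).length : Int) 1).reverse.find?
                  (fun i => vowels.any (fun vowel =>
                    PySem.Str.isIn vowel (PySem.List.pyGetD ((pvSplit p).map String.ofList) i ""))) with
              | none =>
                exfalso
                unfold pvSpecF at ihp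
                rw [hf] at ihp
                have := congrArg String.toList ihp
                rw [pv_slice_toList _ _ (by omega), hPl] at this
                have hlen0 := congrArg List.length this
                rw [List.length_drop] at hlen0
                rw [show ((-1 : Int) + 1).toNat = 0 from rfl, Nat.sub_zero] at hlen0
                rw [show ("" : String).toList = [] from rfl] at hlen0
                rw [List.length_nil] at hlen0
                omega
              | some j =>
                unfold pvSpecF at ihp
                rw [hf] at ihp
                simp only [] at ihp ⊢
                rw [← ihp]
                rw [← String.toList_inj]
                rw [String.toList_append, String.toList_append]
                rw [pv_slice_toList _ _ (by omega), pv_slice_toList _ _ (by omega), hPl, hcs, hd]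
                norm_num
            · rw [if_neg hr] at ihp ⊢
              have hr0 : 0 ≤ PySem.Chars.rfind (p.take (pvVQ vowels word).toNat) ['-'] :=
                by have := pv_neg_one_le_rfind (p.take (pvVQ vowels word).toNat) ['-']; omega
              cases hf : (PySem.List.pyRange 0 (((pvSplit p).map String.ofList).length : Int) 1).reverse.find?
                  (fun i => vowels.any (fun vowel =>
                    PySem.Str.isIn vowel (PySem.List.pyGetD ((pvSplit p).map String.ofList) i ""))) with
              | none =>
                exfalso
                unfold pvSpecF at ihp
                rw [hf] at ihp
                have := congrArg String.toList ihp
                rw [pv_slice_toList _ _ (by omega), hPl] at this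
                have hlen' : (p.drop (PySem.Chars.rfind (p.take (pvVQ vowels word).toNat) ['-'] + 1).toNat).length
                    = p.length - (PySem.Chars.rfind (p.take (pvVQ vowels word).toNat) ['-'] + 1).toNat := by
                  rw [List.length_drop]
                rw [show ("" : String).toList = [] from rfl] at this
                have := congrArg List.length this
                rw [hlen'] at this
                simp at this
                omega
              | some j =>
                unfold pvSpecF at ihp
                rw [hf] at ihp
                simp only [] at ihp ⊢
                rw [← ihp]
                rw [← String.toList_inj]
                rw [String.toList_append, String.toList_append]
                rw [pv_slice_toList _ _ (by omega), pv_slice_toList _ _ (by omega), hPl, hcs, hd]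
                rw [List.drop_append_of_le_length (by omega)]
                simp [List.append_assoc]
    · exact pv_main_leaf vowels word hg


-- ===== VERDICT (by name: the statement is the Claim_ definition above) =====
theorem get_rhyme_part_spec : Claim_equal_get_rhyme_part := by
  intro word vowels _
  unfold Spec_get_rhyme_part get_rhyme_part get_rhyme_part_alt
  simp only [pv_syllables, List.length_map]
  by_cases hg : '-' ∈ word.toList
  · have h1 : ¬ (pvSplit word.toList).length = 1 := by
      rw [pvSplit_len_one]; simpa using hg
    have h2 : ¬ PySem.Str.isIn "-" word = false := by
      simp only [PySem.Str.isIn_eq]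
      rw [Bool.not_eq_false, PySem.Chars.isIn_iff_infix]
      exact (List.singleton_infix_iff '-' word.toList).mpr hg
    rw [if_neg h1, if_neg h2, pv_aLoop_eq]
    have hm := pv_main word.toList.length vowels word le_rfl
    unfold pvSpecF at hm
    simp only [List.length_map] at hm
    exact hm.symm
  · have h1 : (pvSplit word.toList).length = 1 := (pvSplit_len_one word.toList).mpr hg
    have h2 : PySem.Str.isIn "-" word = false := by
      simp only [PySem.Str.isIn_eq]
      rw [PySem.Chars.isIn_eq_false_iff]
      intro hc
      exact hg ((List.singleton_infix_iff '-' word.toList).mp hc)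
    rw [if_pos h1, if_pos h2]
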